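-- pv_equiv track=rewrite | github.com/royut/Leet-Code | Problems/2560. House Robber IV - Python/main.py | checkWithGuess
-- ===== SOURCE A (Python) =====
-- def checkWithGuess(nums, k, guess):
--     possible = 0
--     index = 0
--     while index < len(nums):
--         if nums[index] <= guess:
--             possible += 1
--             index += 2
--         else:
--             index += 1
--     return possible >= k
-- ===== SOURCE B (Python) =====
-- def checkWithGuess(nums, k, guess):
--     # Backward House-Robber DP: b1 = best count of non-adjacent eligible
--     # houses in the suffix starting at the current index + 1, b2 at index + 2.
--     b1 = 0
--     b2 = 0
--     for x in reversed(nums):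
--         cur = b1
--         if x <= guess:
--             cur = max(cur, 1 + b2)
--         b2, b1 = b1, cur
--     return b1 >= k
-- ===== Notes on version B (the rewrite author's own statement) =====
-- stated objective: alternative
-- what changed: Replaces the index-skipping greedy (jump +2 after taking a house) with a backward House-Robber dynamic program keeping two suffix-optimal counts (take/skip), relying on the proved fact that the greedy count is optimal.
import Mathlib
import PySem

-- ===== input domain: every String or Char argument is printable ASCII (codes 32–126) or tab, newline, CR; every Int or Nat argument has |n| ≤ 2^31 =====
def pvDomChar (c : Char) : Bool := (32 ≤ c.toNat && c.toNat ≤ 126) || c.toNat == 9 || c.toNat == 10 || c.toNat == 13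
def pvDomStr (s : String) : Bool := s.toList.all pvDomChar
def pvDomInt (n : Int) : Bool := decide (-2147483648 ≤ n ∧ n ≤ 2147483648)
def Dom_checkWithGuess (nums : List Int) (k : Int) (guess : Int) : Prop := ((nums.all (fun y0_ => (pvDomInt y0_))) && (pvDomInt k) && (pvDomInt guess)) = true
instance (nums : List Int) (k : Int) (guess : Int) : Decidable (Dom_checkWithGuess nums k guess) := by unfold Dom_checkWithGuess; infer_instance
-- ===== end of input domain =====

-- B replaces A's index-skipping greedy with a backward two-state House-Robber DP (alternative algorithm, same cost).


-- ===== PORT A =====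
-- the while loop: possible/index state, index jumps by 2 after a take
def goA (nums : List Int) (guess : Int) (possible : Int) (index : Nat) : Int :=
  if h : index < nums.length then
    if nums[index] ≤ guess then goA nums guess (possible + 1) (index + 2)
    else goA nums guess possible (index + 1)
  else possible
termination_by nums.length - index

def checkWithGuess (nums : List Int) (k : Int) (guess : Int) : Bool :=
  decide (goA nums guess 0 0 ≥ k)

-- ===== PORT B =====
-- one DP step of Source B's loop body: state (b1, b2)
def stepB (guess : Int) (st : Int × Int) (x : Int) : Int × Int :=
  let cur := if x ≤ guess then max st.1 (1 + st.2) else st.1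
  (cur, st.1)

def checkWithGuess_alt (nums : List Int) (k : Int) (guess : Int) : Bool :=
  decide ((nums.reverse.foldl (stepB guess) (0, 0)).1 ≥ k)

-- ===== PRECONDITION & SPEC =====
def Spec_checkWithGuess (nums : List Int) (k : Int) (guess : Int) (out : Bool) : Prop := out = checkWithGuess_alt nums k guess
instance (nums : List Int) (k : Int) (guess : Int) (out : Bool) : Decidable (Spec_checkWithGuess nums k guess out) := by unfold Spec_checkWithGuess; infer_instance

-- ===== CLAIM (what is proved, stated in full; the proofs are below) =====
def Claim_equal_checkWithGuess : Prop := ∀ (nums : List Int) (k : Int) (guess : Int), Dom_checkWithGuess nums k guess → Spec_checkWithGuess nums k guess (checkWithGuess nums k guess)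

-- ===== LEMMAS AND PROOFS =====

-- head recursion form of A's greedy count
def G (guess : Int) : List Int → Int
  | [] => 0
  | x :: t => if x ≤ guess then 1 + G guess t.tail else G guess t
termination_by l => l.length
decreasing_by
  · simp only [List.length_cons, List.length_tail]; omega
  · simp

theorem G_tail_le (guess : Int) (l : List Int) :
    G guess l.tail ≤ G guess l ∧ G guess l ≤ 1 + G guess l.tail := by
  match l with
  | [] => simp [G]
  | x :: t =>
    have ht := G_tail_le guess t
    constructor
    · show G guess t ≤ G guess (x :: t)
      rw [G]
      split_ifs <;> omega
    · show G guess (x :: t) ≤ 1 + G guess t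
      rw [G]
      split_ifs <;> omega
termination_by l.length
decreasing_by simp

theorem goA_eq (nums : List Int) (guess : Int) (possible : Int) (index : Nat) :
    goA nums guess possible index = possible + G guess (nums.drop index) := by
  rw [goA]
  split_ifs with h hle
  · rw [goA_eq nums guess (possible + 1) (index + 2)]
    have hd : nums.drop index = nums[index] :: nums.drop (index + 1) :=
      (List.getElem_cons_drop h).symm
    rw [hd, G, List.tail_drop, show index + 1 + 1 = index + 2 from rfl]
    simp [hle]
    omega
  · rw [goA_eq nums guess possible (index + 1)]
    have hd : nums.drop index = nums[index] :: nums.drop (index + 1) :=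
      (List.getElem_cons_drop h).symm
    rw [hd, G]
    simp [hle]
  · have : nums.drop index = [] := List.drop_eq_nil_of_le (by omega)
    simp [this, G]
termination_by nums.length - index
decreasing_by all_goals omega

theorem foldB_eq (guess : Int) (l : List Int) :
    l.foldr (fun x st => stepB guess st x) (0, 0) =
      (G guess l, G guess l.tail) := by
  match l with
  | [] => simp [G]
  | x :: t =>
    rw [List.foldr_cons, foldB_eq guess t, stepB]
    match t with
    | [] => simp [G]
    | y :: s =>
      simp only [List.tail_cons]
      conv_rhs => rw [G]
      simp only [List.tail_cons]
      have h1 := G_tail_le guess (y :: s)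
      simp only [List.tail_cons] at h1
      split_ifs with hle
      · refine Prod.ext ?_ rfl
        simp only
        omega
      · rfl
termination_by l.length
decreasing_by simp

theorem checkWithGuess_agree (nums : List Int) (k guess : Int) :
    checkWithGuess nums k guess = checkWithGuess_alt nums k guess := by
  unfold checkWithGuess checkWithGuess_alt
  rw [List.foldl_reverse, foldB_eq, goA_eq]
  simp

-- ===== VERDICT (by name: the statement is the Claim_ definition above) =====
theorem checkWithGuess_spec : Claim_equal_checkWithGuess := by
  intro nums k guess _
  unfold Spec_checkWithGuess
  exact checkWithGuess_agree nums k guess
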